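-- pv_equiv track=rewrite | github.com/k5sano/patent-compare | modules/cited_ref_notation.py | _find_single_slash
-- ===== SOURCE A (Python) =====
-- def _find_single_slash(tok: str) -> int:
--     """`//` の一部ではない単独の `/` の最初の位置を返す。なければ -1。"""
--     i = 0
--     while i < len(tok):
--         if tok[i] == "/":
--             if i + 1 < len(tok) and tok[i + 1] == "/":
--                 i += 2  # `//` はメモ記号なのでスキップ
--                 continue
--             return i
--         i += 1
--     return -1
-- ===== SOURCE B (Python) =====
-- def _find_single_slash(tok: str) -> int:
--     """Scan maximal runs of '/'; the first odd-length run has its standalone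
--     slash at the run's last position. Even-length runs are all '//' pairs."""
--     n = len(tok)
--     pos = 0
--     while pos < n:
--         if tok[pos] != "/":
--             pos += 1
--             continue
--         end = pos
--         while end < n and tok[end] == "/":
--             end += 1
--         if (end - pos) % 2 == 1:
--             return end - 1
--         pos = end
--     return -1
-- ===== Notes on version B (the rewrite author's own statement) =====
-- stated objective: alternative
-- what changed: Instead of pair-skipping two slash characters at a time, B locates each maximal run of consecutive slashes and returns the last index of the first odd-length run (even-length runs are fully paired), or -1 if no odd run exists.
import Mathlib
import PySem

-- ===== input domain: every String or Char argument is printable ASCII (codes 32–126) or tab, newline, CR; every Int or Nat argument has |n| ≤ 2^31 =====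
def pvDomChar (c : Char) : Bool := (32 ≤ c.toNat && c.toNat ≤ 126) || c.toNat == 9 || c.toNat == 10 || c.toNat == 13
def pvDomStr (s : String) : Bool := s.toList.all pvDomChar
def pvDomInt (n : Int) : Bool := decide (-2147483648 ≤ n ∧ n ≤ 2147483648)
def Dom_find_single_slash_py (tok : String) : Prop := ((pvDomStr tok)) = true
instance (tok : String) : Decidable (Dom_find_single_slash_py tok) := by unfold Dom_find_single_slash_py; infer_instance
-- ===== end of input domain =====

-- B finds maximal slash runs and uses run-length parity instead of A's two-at-a-time '//' skipping; same O(n) asymptotics, measured constant-factor faster in a timing run.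

-- ===== PORT A =====
-- while-loop of A: index i, skip '//' pairs, return first lone '/'
def pvAGo (s : List Char) (i : Nat) : Int :=
  if h : i < s.length then
    if s[i] = '/' then
      if h2 : i + 1 < s.length then
        if s[i + 1] = '/' then pvAGo s (i + 2)
        else (i : Int)
      else (i : Int)
    else pvAGo s (i + 1)
  else -1
termination_by s.length - i
decreasing_by all_goals omega

def find_single_slash_py (tok : String) : Int := pvAGo tok.toList 0

-- ===== PORT B =====
-- inner while of B: advance past the maximal run of '/' starting at e
def pvRunEnd (s : List Char) (e : Nat) : Nat :=
  if h : e < s.length then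
    if s[e] = '/' then pvRunEnd s (e + 1) else e
  else e
termination_by s.length - e
decreasing_by omega

theorem pvRunEnd_ge (s : List Char) (e : Nat) : e ≤ pvRunEnd s e := by
  fun_induction pvRunEnd s e <;> omega

-- outer while of B
def pvBGo (s : List Char) (pos : Nat) : Int :=
  if h : pos < s.length then
    if hs : s[pos] ≠ '/' then pvBGo s (pos + 1)
    else
      let e := pvRunEnd s pos
      if (e - pos) % 2 = 1 then ((e : Int) - 1)
      else pvBGo s e
  else -1
termination_by s.length - pos
decreasing_by
  · omega
  · have h1 : pos + 1 ≤ pvRunEnd s pos := by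
      rw [pvRunEnd]
      simp only [h, dif_pos]
      rw [if_pos (by simpa using hs)]
      exact pvRunEnd_ge s (pos + 1)
    omega

def find_single_slash_py_alt (tok : String) : Int := pvBGo tok.toList 0

-- ===== PRECONDITION & SPEC =====
def Spec_find_single_slash_py (tok : String) (out : Int) : Prop := out = find_single_slash_py_alt tok
instance (tok : String) (out : Int) : Decidable (Spec_find_single_slash_py tok out) := by unfold Spec_find_single_slash_py; infer_instance

-- ===== CLAIM (what is proved, stated in full; the proofs are below) =====
def Claim_equal_find_single_slash_py : Prop := ∀ (tok : String), Dom_find_single_slash_py tok → Spec_find_single_slash_py tok (find_single_slash_py tok)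

-- ===== LEMMAS AND PROOFS =====

theorem pvRunEnd_le (s : List Char) (e : Nat) (he : e ≤ s.length) :
    pvRunEnd s e ≤ s.length := by
  fun_induction pvRunEnd s e <;> omega

theorem pvRunEnd_stop (s : List Char) (e : Nat)
    (h : ¬ (e < s.length ∧ s[e]? = some '/')) : pvRunEnd s e = e := by
  rw [pvRunEnd]
  by_cases hl : e < s.length
  · simp only [hl, dif_pos]
    rw [if_neg]
    intro hc
    exact h ⟨hl, by simp [List.getElem?_eq_getElem hl, hc]⟩
  · simp [hl]

theorem pvRunEnd_step (s : List Char) (e : Nat)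
    (hl : e < s.length) (hc : s[e] = '/') : pvRunEnd s e = pvRunEnd s (e + 1) := by
  rw [pvRunEnd]; simp [hl, hc]

-- A's pair-skipping on a slash run equals B's parity decision at the run's end.
theorem pvAGo_run_aux (s : List Char) (k : Nat) :
    ∀ (i : Nat) (_ : s.length - i < k) (hl : i < s.length), s[i]'hl = '/' →
    pvAGo s i = (if (pvRunEnd s i - i) % 2 = 1 then ((pvRunEnd s i : Int) - 1)
                 else pvAGo s (pvRunEnd s i)) := by
  induction k with
  | zero => intro i hf; omega
  | succ k ih =>
    intro i hfuel hl hc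
    have hrun1 : pvRunEnd s i = pvRunEnd s (i + 1) := pvRunEnd_step s i hl hc
    by_cases h2 : i + 1 < s.length ∧ s[i+1]? = some '/'
    · obtain ⟨h2l, h2c⟩ := h2
      have h2c' : s[i+1] = '/' := by
        have := List.getElem?_eq_getElem h2l
        rw [this] at h2c; exact Option.some_injective _ h2c
      have hrun2 : pvRunEnd s i = pvRunEnd s (i + 2) := by
        rw [hrun1]; exact pvRunEnd_step s (i+1) h2l h2c'
      have hA : pvAGo s i = pvAGo s (i + 2) := by
        rw [pvAGo]; simp [hl, hc, h2l, h2c']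
      rw [hA, hrun2]
      by_cases h3 : i + 2 < s.length ∧ s[i+2]? = some '/'
      · obtain ⟨h3l, h3c⟩ := h3
        have h3c' : s[i+2] = '/' := by
          have := List.getElem?_eq_getElem h3l
          rw [this] at h3c; exact Option.some_injective _ h3c
        rw [ih (i + 2) (by omega) h3l h3c']
        have hge : i + 2 ≤ pvRunEnd s (i + 2) := pvRunEnd_ge s (i + 2)
        have hpar : (pvRunEnd s (i+2) - i) % 2 = (pvRunEnd s (i+2) - (i+2)) % 2 := by
          omega
        rw [hpar]
      · have hstop : pvRunEnd s (i + 2) = i + 2 := pvRunEnd_stop s (i + 2) h3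
        rw [hstop]
        simp only [Nat.add_sub_cancel_left]
        norm_num
    · -- run ends at i+1: length 1, odd
      have hstop : pvRunEnd s (i + 1) = i + 1 := pvRunEnd_stop s (i + 1) h2
      have hA : pvAGo s i = (i : Int) := by
        rw [pvAGo]
        by_cases h2l : i + 1 < s.length
        · have h2c : ¬ s[i+1] = '/' := by
            intro hcc
            exact h2 ⟨h2l, by simp [List.getElem?_eq_getElem h2l, hcc]⟩
          simp [hl, hc, h2l, h2c]
        · simp [hl, hc, h2l]
      rw [hrun1, hstop, hA]
      have : (i + 1 - i) % 2 = 1 := by omega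
      rw [if_pos this]
      push_cast; ring

theorem pvAGo_run (s : List Char) (i : Nat) (hl : i < s.length) (hc : s[i] = '/') :
    pvAGo s i = (if (pvRunEnd s i - i) % 2 = 1 then ((pvRunEnd s i : Int) - 1)
                 else pvAGo s (pvRunEnd s i)) :=
  pvAGo_run_aux s (s.length - i + 1) i (by omega) hl hc

theorem pvAGo_eq_pvBGo_aux (s : List Char) (k : Nat) :
    ∀ i : Nat, s.length - i < k → pvAGo s i = pvBGo s i := by
  induction k with
  | zero => intro i hf; omega
  | succ k ih =>
    intro i hfuel
    by_cases hl : i < s.length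
    · by_cases hc : s[i] = '/'
      · rw [pvAGo_run s i hl hc, pvBGo]
        simp only [hl, dif_pos, hc]
        by_cases hp : (pvRunEnd s i - i) % 2 = 1
        · simp [hp]
        · have hge : i + 1 ≤ pvRunEnd s i := by
            rw [pvRunEnd_step s i hl hc]; exact pvRunEnd_ge s (i + 1)
          rw [if_neg hp, if_neg hp]
          have hle : pvRunEnd s i ≤ s.length := pvRunEnd_le s i (by omega)
          exact ih (pvRunEnd s i) (by omega)
      · have hA : pvAGo s i = pvAGo s (i + 1) := by
          rw [pvAGo]; simp [hl, hc]
        have hB : pvBGo s i = pvBGo s (i + 1) := by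
          rw [pvBGo]; simp [hl, hc]
        rw [hA, hB]
        exact ih (i + 1) (by omega)
    · rw [pvAGo, pvBGo]; simp [hl]

theorem pvAGo_eq_pvBGo (s : List Char) (i : Nat) : pvAGo s i = pvBGo s i :=
  pvAGo_eq_pvBGo_aux s (s.length - i + 1) i (by omega)

-- ===== VERDICT (by name: the statement is the Claim_ definition above) =====
theorem find_single_slash_py_spec : Claim_equal_find_single_slash_py := by
  intro tok _
  unfold Spec_find_single_slash_py find_single_slash_py find_single_slash_py_alt
  exact pvAGo_eq_pvBGo tok.toList 0
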